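-- pv_equiv track=rewrite | github.com/Clayton044/Competitive-Programming | 31-Aug-2025/Find Kth Largest XOR Coordinate Value 390466.py | kthLargestValue
-- ===== SOURCE A (Python) =====
-- from typing import List
--
-- import heapq
--
-- def kthLargestValue(matrix: List[List[int]], k: int) -> int:
--     m, n = len(matrix), len(matrix[0])
--     prefix = [[0] * (n + 1) for _ in range(m + 1)]
--     values = []
--
--     for i in range(1, m + 1):
--         for j in range(1, n + 1):
--             prefix[i][j] = (matrix[i-1][j-1] ^
--                             prefix[i-1][j] ^
--                             prefix[i][j-1] ^
--                             prefix[i-1][j-1])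
--             values.append(prefix[i][j])
--
--     # Use heapq.nlargest for efficiency instead of full sort
--     return heapq.nlargest(k, values)[-1]
-- ===== SOURCE B (Python) =====
-- import heapq
--
-- def kthLargestValue(matrix, k):
--     n = len(matrix[0])
--     values = []
--     prev = [0] * n                 # previous row of 2D prefix-XORs
--     for row in matrix:
--         pref = []                  # row prefix-XORs of this row
--         acc = 0
--         for x in row[:n]:
--             acc ^= x
--             pref.append(acc)
--         prev = [p ^ q for p, q in zip(prev, pref)]
--         values += prev
--     return heapq.nlargest(k, values)[-1]
-- ===== Notes on version B (the rewrite author's own statement) =====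
-- stated objective: alternative
-- what changed: B drops A's stored (m+1)x(n+1) table with its 4-term XOR recurrence; it works in two stages per row (a 1D prefix-XOR scan of the row, then an elementwise XOR with the previous result row), keeping only one row of state; the nlargest selection line is kept identical.
import Mathlib
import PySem

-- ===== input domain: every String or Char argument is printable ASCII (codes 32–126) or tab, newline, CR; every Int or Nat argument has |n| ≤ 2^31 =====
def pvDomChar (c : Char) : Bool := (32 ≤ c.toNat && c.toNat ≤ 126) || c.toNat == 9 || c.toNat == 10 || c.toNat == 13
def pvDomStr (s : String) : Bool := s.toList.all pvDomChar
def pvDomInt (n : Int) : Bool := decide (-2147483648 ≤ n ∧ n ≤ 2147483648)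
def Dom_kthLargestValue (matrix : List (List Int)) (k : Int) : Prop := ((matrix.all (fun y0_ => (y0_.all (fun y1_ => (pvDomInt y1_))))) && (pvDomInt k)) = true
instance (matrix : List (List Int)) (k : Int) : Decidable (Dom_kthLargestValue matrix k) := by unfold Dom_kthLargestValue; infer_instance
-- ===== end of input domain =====

-- B replaces A's stored (m+1)x(n+1) table and its 4-term XOR recurrence by two staged passes
-- per row — a 1D prefix-XOR scan of the row, then an elementwise XOR with the previous result
-- row — keeping one row of state (objective: alternative; O(n) extra space).
-- Both return values only; neither Python mutates its arguments.

-- ===== PORT A =====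
-- A's inner loop fills prefix row i left to right; it reads only prefix[i-1] (prev, head p and
-- tail ps) and the cell prefix[i][j-1] just written (vPrev) — earlier rows of A's stored table
-- are never read again, so the port carries exactly those values.
-- v = matrix[i-1][j-1] ^ prefix[i-1][j] ^ prefix[i][j-1] ^ prefix[i-1][j-1], left-associated as in A.
def pvARow : Int → Int → List Int → List Int → List Int
  | vPrev, pPrev, m :: ms, p :: ps =>
    let v := PySem.Int.bxor (PySem.Int.bxor (PySem.Int.bxor m p) vPrev) pPrev
    v :: pvARow v p ms ps
  | _, _, _, _ => []

-- outer loop over the rows of matrix, carrying prefix[i-1] (entries 1..n) and the values list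
def pvALoop : List (List Int) → Nat → List Int → List Int → List Int
  | [], _, _, acc => acc
  | r :: rs, n, prev, acc =>
    let cur := pvARow 0 0 (r.take n) prev
    pvALoop rs n cur (acc ++ cur)

-- heapq.nlargest(k, vs) = sorted(vs, reverse=True)[:k], and [] for k <= 0 (Python docs' stated
-- equivalence); used by both ports, whose selection line is identical.
def pvNlargest (k : Int) (vs : List Int) : List Int :=
  if k ≤ 0 then [] else (PySem.List.sorted vs (fun x => x) true).take k.toNat

def kthLargestValue (matrix : List (List Int)) (k : Int) : Int :=
  let n := ((PySem.List.pyGet? matrix 0).getD []).length   -- len(matrix[0]); Pre_ excludes matrix = []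
  let values := pvALoop matrix n (List.replicate n 0) []
  ((PySem.List.pyGet? (pvNlargest k values) (-1)).getD 0)  -- [-1]; none (IndexError) excluded by Pre_

-- ===== PORT B =====
-- pref = prefix-XOR scan of row[:n]  (acc ^= x; pref.append(acc))
def pvBScan : Int → List Int → List Int
  | _, [] => []
  | acc, x :: xs =>
    let a := PySem.Int.bxor acc x
    a :: pvBScan a xs

-- prev = [p ^ q for p, q in zip(prev, pref)]; values += prev; recursion builds values back-to-front
def pvBRows : List (List Int) → Nat → List Int → List Int
  | [], _, _ => []
  | r :: rs, n, prev =>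
    let prev' := List.zipWith PySem.Int.bxor prev (pvBScan 0 (r.take n))
    prev' ++ pvBRows rs n prev'

def kthLargestValue_alt (matrix : List (List Int)) (k : Int) : Int :=
  let n := ((PySem.List.pyGet? matrix 0).getD []).length
  let values := pvBRows matrix n (List.replicate n 0)
  ((PySem.List.pyGet? (pvNlargest k values) (-1)).getD 0)

-- ===== PRECONDITION & SPEC =====
-- Pre_ excludes exactly the inputs where Python A raises: matrix == [] or matrix[0] == []
-- (IndexError on matrix[0] resp. on the [-1] of an empty nlargest), a row shorter than
-- len(matrix[0]) (IndexError inside the loop), and k < 1 (nlargest returns [], so [-1] raises).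
def Pre_kthLargestValue (matrix : List (List Int)) (k : Int) : Prop :=
  1 ≤ k ∧ matrix ≠ [] ∧ (matrix.head?.getD []) ≠ [] ∧
    ∀ r ∈ matrix, (matrix.head?.getD []).length ≤ r.length
instance (matrix : List (List Int)) (k : Int) : Decidable (Pre_kthLargestValue matrix k) := by
  unfold Pre_kthLargestValue; infer_instance

def pvWitness_kthLargestValue : List (List Int) × Int := ([[5, 2], [1, 6]], 2)

def Spec_kthLargestValue (matrix : List (List Int)) (k : Int) (out : Int) : Prop := out = kthLargestValue_alt matrix k
instance (matrix : List (List Int)) (k : Int) (out : Int) : Decidable (Spec_kthLargestValue matrix k out) := by unfold Spec_kthLargestValue; infer_instance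

-- ===== CLAIM (what is proved, stated in full; the proofs are below) =====
def Claim_equal_kthLargestValue : Prop := ∀ (matrix : List (List Int)) (k : Int), Dom_kthLargestValue matrix k → Pre_kthLargestValue matrix k → Spec_kthLargestValue matrix k (kthLargestValue matrix k)

-- ===== LEMMAS AND PROOFS =====

-- sign/magnitude view of Python ints: pvMk false n = n, pvMk true n = -n-1
def pvMk (s : Bool) (n : Nat) : Int := if s then -(n : Int) - 1 else (n : Int)
def pvS (a : Int) : Bool := !decide (0 ≤ a)
def pvE (a : Int) : Nat := if 0 ≤ a then a.toNat else (-a).toNat - 1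

theorem pv_bxor_mk (a b : Int) :
    PySem.Int.bxor a b = pvMk (xor (pvS a) (pvS b)) (pvE a ^^^ pvE b) := by
  by_cases ha : 0 ≤ a <;> by_cases hb : 0 ≤ b <;>
    simp [PySem.Int.bxor, pvS, pvE, pvMk, ha, hb]

theorem pvS_mk (s : Bool) (n : Nat) : pvS (pvMk s n) = s := by
  cases s with
  | false => simp [pvS, pvMk]
  | true =>
    show (!decide ((0 : Int) ≤ -(n : Int) - 1)) = true
    rw [decide_eq_false (by omega : ¬ (0 : Int) ≤ -(n : Int) - 1)]
    rfl

theorem pvE_mk (s : Bool) (n : Nat) : pvE (pvMk s n) = n := by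
  cases s with
  | false => simp [pvE, pvMk]
  | true =>
    show (if (0 : Int) ≤ -(n : Int) - 1 then (-(n : Int) - 1).toNat else (-(-(n : Int) - 1)).toNat - 1) = n
    rw [if_neg (by omega : ¬ (0 : Int) ≤ -(n : Int) - 1)]
    omega

theorem pv_bxor_assoc (a b c : Int) :
    PySem.Int.bxor (PySem.Int.bxor a b) c = PySem.Int.bxor a (PySem.Int.bxor b c) := by
  simp only [pv_bxor_mk, pvS_mk, pvE_mk]
  rw [Bool.xor_assoc, Nat.xor_assoc]

theorem pv_bxor_zero_left (a : Int) : PySem.Int.bxor 0 a = a := by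
  rw [PySem.Int.bxor_comm]; simp

theorem pv_bxor_left_comm (a b c : Int) :
    PySem.Int.bxor a (PySem.Int.bxor b c) = PySem.Int.bxor b (PySem.Int.bxor a c) := by
  rw [← pv_bxor_assoc, PySem.Int.bxor_comm a b, pv_bxor_assoc]

theorem pv_bxor_cancel_left (a b : Int) : PySem.Int.bxor a (PySem.Int.bxor a b) = b := by
  rw [← pv_bxor_assoc]; simp [pv_bxor_zero_left]

-- A's 4-term recurrence collapses to prev ^ row-prefix when the carried cell is p0 ^ rx
theorem pv_bxor_key (m p p0 rx : Int) :
    PySem.Int.bxor (PySem.Int.bxor (PySem.Int.bxor m p) (PySem.Int.bxor p0 rx)) p0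
      = PySem.Int.bxor p (PySem.Int.bxor rx m) := by
  simp only [pv_bxor_assoc]
  simp [PySem.Int.bxor_comm, pv_bxor_left_comm, pv_bxor_cancel_left]

theorem pv_row_eq (ms : List Int) : ∀ (ps : List Int) (rx p0 : Int),
    pvARow (PySem.Int.bxor p0 rx) p0 ms ps
      = List.zipWith PySem.Int.bxor ps (pvBScan rx ms) := by
  induction ms with
  | nil => intro ps rx p0; cases ps <;> rfl
  | cons m ms ih =>
    intro ps rx p0
    cases ps with
    | nil => rfl
    | cons p ps =>
      simp only [pvARow, pvBScan, List.zipWith]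
      rw [pv_bxor_key m p p0 rx, ih ps (PySem.Int.bxor rx m) p]

theorem pv_row0_eq (ms ps : List Int) :
    pvARow 0 0 ms ps = List.zipWith PySem.Int.bxor ps (pvBScan 0 ms) := by
  have h : PySem.Int.bxor (0 : Int) 0 = 0 := by decide
  have := pv_row_eq ms ps 0 0
  rwa [h] at this

theorem pv_loop_eq (rows : List (List Int)) : ∀ (n : Nat) (prev acc : List Int),
    pvALoop rows n prev acc = acc ++ pvBRows rows n prev := by
  induction rows with
  | nil => intro n prev acc; simp [pvALoop, pvBRows]
  | cons r rs ih =>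
    intro n prev acc
    simp only [pvALoop, pvBRows, pv_row0_eq]
    rw [ih, List.append_assoc]

-- ===== VERDICT (by name: the statement is the Claim_ definition above) =====
theorem kthLargestValue_spec : Claim_equal_kthLargestValue := by
  intro matrix k _ _
  unfold Spec_kthLargestValue kthLargestValue kthLargestValue_alt
  simp only [pv_loop_eq, List.nil_append]
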